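-- pv_equiv track=rewrite | github.com/biolab/orange3 | Orange/widgets/data/utils/pythoneditor/syntax/parser.py | _checkEscapedChar
-- ===== SOURCE A (Python) =====
-- def _checkEscapedChar(text):
--     index = 0
--     if len(text) > 1 and text[0] == '\\':
--         index = 1
--
--         if text[index] in "abefnrtv'\"?\\":
--             index += 1
--         elif text[index] == 'x':  # if it's like \xff, eat the x
--             index += 1
--             while index < len(text) and text[index].upper() in '0123456789ABCDEF':
--                 index += 1
--             if index == 2:  # no hex digits
--                 return None
--         elif text[index] in '01234567':
--             while index < 4 and index < len(text) and text[index] in '01234567':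
--                 index += 1
--         else:
--             return None
--
--         return index
--
--     return None
-- ===== SOURCE B (Python) =====
-- import re
--
-- _ESCAPE_RE = re.compile(r"\\(?:[abefnrtv'\"?\\]|x[0-9A-Fa-f]+|[0-7]{1,3})")
--
--
-- def _checkEscapedChar(text):
--     m = _ESCAPE_RE.match(text)
--     return m.end() if m else None
-- ===== Notes on version B (the rewrite author's own statement) =====
-- stated objective: idiomatic
-- what changed: Replaced the hand-written index/while-loop scanner with a single anchored regular expression whose three alternatives (single escape char, \x plus one-or-more hex digits, 1-3 octal digits) are matched by the regex engine; the result is the match length.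
import Mathlib
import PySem

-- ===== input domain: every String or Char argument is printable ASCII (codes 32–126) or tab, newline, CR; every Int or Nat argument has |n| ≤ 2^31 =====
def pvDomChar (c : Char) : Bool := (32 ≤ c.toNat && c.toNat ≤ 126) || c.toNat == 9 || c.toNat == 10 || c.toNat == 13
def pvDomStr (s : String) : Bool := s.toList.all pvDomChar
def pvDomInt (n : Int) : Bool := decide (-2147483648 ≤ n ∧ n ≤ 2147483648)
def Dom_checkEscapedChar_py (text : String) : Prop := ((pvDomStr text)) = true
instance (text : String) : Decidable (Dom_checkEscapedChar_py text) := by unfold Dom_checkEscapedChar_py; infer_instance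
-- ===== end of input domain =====

-- B replaces A's index/while-loop scanner with one anchored regex (ported as a structural
-- matcher over the char list); objective: more idiomatic, same behaviour.


set_option maxRecDepth 4000

-- ===== PORT A =====
-- text[index].upper() on a single char is PySem.Chars.upperChar (exact on this domain).
def hexLoopA (t : List Char) (index : Nat) : Nat :=
  if index < t.length && "0123456789ABCDEF".toList.contains (PySem.Chars.upperChar (t.getD index ' ')) then
    hexLoopA t (index + 1)
  else index
termination_by t.length - index
decreasing_by simp only [Bool.and_eq_true, decide_eq_true_eq] at *; omega

def octLoopA (t : List Char) (index : Nat) : Nat :=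
  if index < 4 && (index < t.length && "01234567".toList.contains (t.getD index ' ')) then
    octLoopA t (index + 1)
  else index
termination_by 4 - index
decreasing_by simp only [Bool.and_eq_true, decide_eq_true_eq] at *; omega

def checkEscapedChar_py (text : String) : Option Int :=
  let t := text.toList
  if t.length > 1 && t.getD 0 ' ' == '\\' then
    let index := 1
    if "abefnrtv'\"?\\".toList.contains (t.getD index ' ') then
      some ((index + 1 : Nat) : Int)
    else if t.getD index ' ' == 'x' then
      let index := hexLoopA t (index + 1)
      if index == 2 then none else some (index : Int)
    else if "01234567".toList.contains (t.getD index ' ') then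
      some ((octLoopA t index : Nat) : Int)
    else none
  else none

-- ===== PORT B =====
-- B is: m = re.match(r"\\(?:[abefnrtv'\"?\\]|x[0-9A-Fa-f]+|[0-7]{1,3})", text); m.end() or None.
-- The fixed anchored regex is ported as a structural matcher, one alternative per branch.
def isHexB (c : Char) : Bool :=
  ('0' ≤ c && c ≤ '9') || ('A' ≤ c && c ≤ 'F') || ('a' ≤ c && c ≤ 'f')

def isOctB (c : Char) : Bool := '0' ≤ c && c ≤ '7'

def reMatchEscape (cs : List Char) : Option Nat :=
  match cs with
  | '\\' :: c :: rest =>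
    if "abefnrtv'\"?\\".toList.contains c then some 2
    else if c == 'x' then
      let k := (rest.takeWhile isHexB).length      -- x[0-9A-Fa-f]+ : greedy, at least one
      if 1 ≤ k then some (2 + k) else none
    else if isOctB c then
      some (2 + ((rest.takeWhile isOctB).take 2).length)   -- [0-7]{1,3}
    else none
  | _ => none

def checkEscapedChar_py_alt (text : String) : Option Int :=
  (reMatchEscape text.toList).map (fun n => (n : Int))

-- ===== PRECONDITION & SPEC =====
def Spec_checkEscapedChar_py (text : String) (out : Option Int) : Prop := out = checkEscapedChar_py_alt text
instance (text : String) (out : Option Int) : Decidable (Spec_checkEscapedChar_py text out) := by unfold Spec_checkEscapedChar_py; infer_instance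

-- ===== CLAIM (what is proved, stated in full; the proofs are below) =====
def Claim_equal_checkEscapedChar_py : Prop := ∀ (text : String), Dom_checkEscapedChar_py text → Spec_checkEscapedChar_py text (checkEscapedChar_py text)

-- ===== LEMMAS AND PROOFS =====

lemma char_eq_iff_toNat (c d : Char) : c = d ↔ c.toNat = d.toNat :=
  ⟨fun h => h ▸ rfl, fun h => by rw [← Char.ofNat_toNat c, h, Char.ofNat_toNat]⟩

lemma char_le_iff_toNat (c d : Char) : c ≤ d ↔ c.toNat ≤ d.toNat := by
  rw [Char.le_def]
  exact UInt32.le_iff_toNat_le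

lemma tn0 : '0'.toNat = 48 := rfl
lemma tn1 : '1'.toNat = 49 := rfl
lemma tn2 : '2'.toNat = 50 := rfl
lemma tn3 : '3'.toNat = 51 := rfl
lemma tn4 : '4'.toNat = 52 := rfl
lemma tn5 : '5'.toNat = 53 := rfl
lemma tn6 : '6'.toNat = 54 := rfl
lemma tn7 : '7'.toNat = 55 := rfl
lemma tn8 : '8'.toNat = 56 := rfl
lemma tn9 : '9'.toNat = 57 := rfl
lemma tnA : 'A'.toNat = 65 := rfl
lemma tnB : 'B'.toNat = 66 := rfl
lemma tnC : 'C'.toNat = 67 := rfl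
lemma tnD : 'D'.toNat = 68 := rfl
lemma tnE : 'E'.toNat = 69 := rfl
lemma tnF : 'F'.toNat = 70 := rfl
lemma tna : 'a'.toNat = 97 := rfl
lemma tnf : 'f'.toNat = 102 := rfl
lemma tnz : 'z'.toNat = 122 := rfl

lemma hexPred_eq (c : Char) :
    ("0123456789ABCDEF".toList.contains (PySem.Chars.upperChar c)) = isHexB c := by
  have hL : "0123456789ABCDEF".toList
      = ['0','1','2','3','4','5','6','7','8','9','A','B','C','D','E','F'] := rfl
  rw [hL]
  unfold PySem.Chars.upperChar PySem.Chars.islower isHexB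
  by_cases h : 97 ≤ c.toNat ∧ c.toNat ≤ 122
  · rw [if_pos (by
      simp only [Bool.and_eq_true, decide_eq_true_eq, char_le_iff_toNat, tna, tnz]
      omega)]
    have hup : (Char.ofNat (c.toNat - 32)).toNat = c.toNat - 32 := by
      rw [Char.toNat_ofNat, if_pos]; left; omega
    rw [Bool.eq_iff_iff]
    simp only [List.contains_cons, List.contains_nil, Bool.or_eq_true, Bool.and_eq_true,
      beq_iff_eq, decide_eq_true_eq, char_eq_iff_toNat, char_le_iff_toNat, hup,
      tn0, tn1, tn2, tn3, tn4, tn5, tn6, tn7, tn8, tn9, tnA, tnB, tnC, tnD, tnE, tnF,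
      tna, tnf, Bool.false_eq_true, or_false]
    constructor <;> (intro hh; omega)
  · rw [if_neg (by
      simp only [Bool.and_eq_true, decide_eq_true_eq, char_le_iff_toNat, tna, tnz]
      omega)]
    rw [Bool.eq_iff_iff]
    simp only [List.contains_cons, List.contains_nil, Bool.or_eq_true, Bool.and_eq_true,
      beq_iff_eq, decide_eq_true_eq, char_eq_iff_toNat, char_le_iff_toNat,
      tn0, tn1, tn2, tn3, tn4, tn5, tn6, tn7, tn8, tn9, tnA, tnB, tnC, tnD, tnE, tnF,
      tna, tnf, Bool.false_eq_true, or_false]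
    constructor <;> (intro hh; omega)

lemma octPred_eq (c : Char) :
    ("01234567".toList.contains c) = isOctB c := by
  have hL : "01234567".toList = ['0','1','2','3','4','5','6','7'] := rfl
  rw [hL]
  unfold isOctB
  rw [Bool.eq_iff_iff]
  simp only [List.contains_cons, List.contains_nil, Bool.or_eq_true, Bool.and_eq_true,
    beq_iff_eq, decide_eq_true_eq, char_eq_iff_toNat, char_le_iff_toNat,
    tn0, tn1, tn2, tn3, tn4, tn5, tn6, tn7, Bool.false_eq_true, or_false]
  constructor <;> (intro hh; omega)

lemma getD_eq_getElem' (t : List Char) (i : Nat) (h : i < t.length) :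
    t.getD i ' ' = t[i] := by
  simp [List.getD, List.getElem?_eq_getElem h]

lemma hexLoopA_eq (t : List Char) (i : Nat) :
    hexLoopA t i = i + ((t.drop i).takeWhile isHexB).length := by
  have key : ∀ n i, t.length - i ≤ n →
      hexLoopA t i = i + ((t.drop i).takeWhile isHexB).length := by
    intro n
    induction n with
    | zero =>
      intro i hi
      have hge : t.length ≤ i := by omega
      rw [hexLoopA, if_neg (by simp; omega), List.drop_eq_nil_of_le hge]
      simp
    | succ n ih =>
      intro i hi
      rw [hexLoopA]
      by_cases hlt : i < t.length
      · rw [List.drop_eq_getElem_cons hlt, List.takeWhile_cons]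
        have hgd : ("0123456789ABCDEF".toList.contains (PySem.Chars.upperChar (t.getD i ' ')))
            = isHexB t[i] := by
          rw [getD_eq_getElem' t i hlt, hexPred_eq]
        by_cases hp : isHexB t[i] = true
        · rw [if_pos (by
            simp only [Bool.and_eq_true, decide_eq_true_eq]
            exact ⟨hlt, by rw [hgd]; exact hp⟩)]
          rw [ih (i + 1) (by omega), hp]
          simp; omega
        · rw [if_neg (by
            simp only [Bool.and_eq_true, decide_eq_true_eq, not_and]
            intro _
            rw [hgd]
            exact hp)]
          rw [Bool.eq_false_iff.mpr hp]
          simp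
      · rw [if_neg (by simp; omega), List.drop_eq_nil_of_le (by omega)]
        simp
  exact key (t.length - i) i le_rfl

lemma octLoopA_eq (t : List Char) (i : Nat) (hi : i ≤ 4) :
    octLoopA t i = i + min (4 - i) ((t.drop i).takeWhile isOctB).length := by
  have key : ∀ n i, i ≤ 4 → 4 - i ≤ n →
      octLoopA t i = i + min (4 - i) ((t.drop i).takeWhile isOctB).length := by
    intro n
    induction n with
    | zero =>
      intro i hi4 hn
      have h4 : i = 4 := by omega
      subst h4
      rw [octLoopA, if_neg (by simp)]
      simp
    | succ n ih =>
      intro i hi4 hn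
      rw [octLoopA]
      by_cases h4 : i < 4
      · by_cases hlt : i < t.length
        · rw [List.drop_eq_getElem_cons hlt, List.takeWhile_cons]
          have hgd : ("01234567".toList.contains (t.getD i ' ')) = isOctB t[i] := by
            rw [getD_eq_getElem' t i hlt, octPred_eq]
          by_cases hp : isOctB t[i] = true
          · rw [if_pos (by
              simp only [Bool.and_eq_true, decide_eq_true_eq]
              exact ⟨h4, hlt, by rw [hgd]; exact hp⟩)]
            rw [ih (i + 1) (by omega) (by omega), hp]
            simp; omega
          · rw [if_neg (by
              simp only [Bool.and_eq_true, decide_eq_true_eq, not_and]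
              intro _ _
              rw [hgd]
              exact hp)]
            rw [Bool.eq_false_iff.mpr hp]
            simp
        · rw [if_neg (by simp; omega), List.drop_eq_nil_of_le (by omega)]
          simp
      · have h4' : i = 4 := by omega
        subst h4'
        rw [if_neg (by simp)]
        simp
  exact key (4 - i) i hi le_rfl

lemma reMatchEscape_cons (c : Char) (rest : List Char) :
    reMatchEscape ('\\' :: c :: rest) =
      if "abefnrtv'\"?\\".toList.contains c then some 2
      else if c == 'x' then
        (if 1 ≤ (rest.takeWhile isHexB).length then some (2 + (rest.takeWhile isHexB).length) else none)
      else if isOctB c then some (2 + ((rest.takeWhile isOctB).take 2).length) else none := rfl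

lemma reMatchEscape_not_backslash (c0 : Char) (cs : List Char) (h : ¬ c0 = '\\') :
    reMatchEscape (c0 :: cs) = none := by
  unfold reMatchEscape
  split
  · next heq =>
      exfalso
      apply h
      simp only [List.cons.injEq] at heq
      exact heq.1
  · rfl

-- ===== VERDICT (by name: the statement is the Claim_ definition above) =====
theorem checkEscapedChar_py_spec : Claim_equal_checkEscapedChar_py := by
  intro text _
  unfold Spec_checkEscapedChar_py checkEscapedChar_py checkEscapedChar_py_alt
  match htl : text.toList with
  | [] => simp [reMatchEscape]
  | [c] => simp [reMatchEscape]
  | c0 :: c1 :: rest =>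
    by_cases hc0 : c0 = '\\'
    · subst hc0
      rw [if_pos (by simp), reMatchEscape_cons]
      simp only [List.getD_cons_zero, List.getD_cons_succ,
        show (1 + 1 : Nat) = 2 from rfl]
      rw [hexLoopA_eq,
        show octLoopA ('\\' :: c1 :: rest) 1
            = 1 + min 3 ((c1 :: rest).takeWhile isOctB).length from by
          rw [octLoopA_eq _ _ (by omega)]; rfl,
        octPred_eq]
      simp only [List.drop_succ_cons, List.drop_zero, List.takeWhile_cons]
      split_ifs with hcls hx hzero hk hk' hoct
      · simp
      · exfalso
        simp only [beq_iff_eq] at hzero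
        omega
      · simp
      · simp
      · exfalso
        simp only [beq_iff_eq] at hzero
        omega
      · first
        | (simp [List.length_take]; done)
        | (simp [List.length_take]; omega)
      · simp
    · rw [if_neg (by simp [hc0]), reMatchEscape_not_backslash c0 (c1 :: rest) hc0]
      simp
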